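-- pv_equiv track=rewrite | github.com/areeeba-mujeeeb03/referral-reward-backend | main_app/controllers/admin/referral_controllers.py | encode_timestamp
-- ===== SOURCE A (Python) =====
-- def encode_timestamp(number):
--     if not isinstance(number, int):
--         raise TypeError("Input must be an integer.")
--
--     alphabet = "ABCDEFGHIJKLMNOPQRSTUVWXYZ"
--     base = len(alphabet)
--
--     if number == 0:
--         return alphabet[0]
--
--     encoded_string = ""
--     while number > 0:
--         remainder = number % base
--         encoded_string = alphabet[remainder] + encoded_string
--         number //= base
--     return encoded_string
-- ===== SOURCE B (Python) =====
-- def encode_timestamp(number):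
--     if not isinstance(number, int):
--         raise TypeError("Input must be an integer.")
--
--     alphabet = "ABCDEFGHIJKLMNOPQRSTUVWXYZ"
--     base = len(alphabet)
--
--     if number == 0:
--         return alphabet[0]
--
--     # count base-26 digits, then emit most-significant-first
--     k = 0
--     temp = number
--     while temp > 0:
--         temp //= base
--         k += 1
--     return "".join(alphabet[(number // base ** i) % base] for i in range(k - 1, -1, -1))
-- ===== Notes on version B (the rewrite author's own statement) =====
-- stated objective: alternative
-- what changed: B replaces A's least-significant-first prepend loop with a digit-count loop followed by a most-significant-first forward pass indexing digits via number // base**i % base.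
import Mathlib
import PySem

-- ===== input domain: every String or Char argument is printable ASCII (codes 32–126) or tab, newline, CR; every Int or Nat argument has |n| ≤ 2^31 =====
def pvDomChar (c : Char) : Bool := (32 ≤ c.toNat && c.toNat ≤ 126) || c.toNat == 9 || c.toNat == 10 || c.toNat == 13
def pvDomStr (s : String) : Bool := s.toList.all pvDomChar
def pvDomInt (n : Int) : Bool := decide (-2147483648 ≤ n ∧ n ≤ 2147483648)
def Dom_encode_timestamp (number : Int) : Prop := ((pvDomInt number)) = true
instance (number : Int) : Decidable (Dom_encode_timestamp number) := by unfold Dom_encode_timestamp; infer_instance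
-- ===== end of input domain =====

-- B re-encodes most-significant-first from a digit count instead of A's prepend loop; return value only, same result.

-- alphabet = "ABCDEFGHIJKLMNOPQRSTUVWXYZ" (shared literal of both Pythons)
def pvAlphabet : List Char := "ABCDEFGHIJKLMNOPQRSTUVWXYZ".toList

-- alphabet[i]; every index used by either port lies in [0, 26), so the default is never taken
def pvCharAt (i : Int) : Char := (PySem.List.pyGet? pvAlphabet i).getD 'A'

-- number // 26 shrinks toNat (termination of both loops)
theorem pv_floordiv26_lt (n : Int) (h : 0 < n) : (PySem.Int.floordiv n 26).toNat < n.toNat := by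
  rw [PySem.Int.floordiv_eq_ediv_of_pos (by omega : (0:Int) < 26)]
  omega

-- ===== PORT A =====
-- the while loop: encoded_string = alphabet[number % 26] + encoded_string; number //= 26
def pvEncLoopA (number : Int) (encoded : List Char) : List Char :=
  if number > 0 then
    pvEncLoopA (PySem.Int.floordiv number 26)
      (pvCharAt (PySem.Int.mod number 26) :: encoded)
  else encoded
termination_by number.toNat
decreasing_by exact pv_floordiv26_lt _ (by omega)

def encode_timestamp (number : Int) : String :=
  if number = 0 then String.ofList [pvCharAt 0]
  else String.ofList (pvEncLoopA number [])

-- ===== PORT B =====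
-- k = 0; temp = number; while temp > 0: temp //= 26; k += 1
def pvCountDigits (temp : Int) : Nat :=
  if temp > 0 then pvCountDigits (PySem.Int.floordiv temp 26) + 1 else 0
termination_by temp.toNat
decreasing_by exact pv_floordiv26_lt _ (by omega)

-- alphabet[(number // 26**i) % 26] for i in range(k-1, -1, -1)
def pvDigitsB (number : Int) : Nat → List Char
  | 0 => []
  | i + 1 => pvCharAt (PySem.Int.mod (PySem.Int.floordiv number (26 ^ i)) 26) :: pvDigitsB number i

def encode_timestamp_alt (number : Int) : String :=
  if number = 0 then String.ofList [pvCharAt 0]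
  else String.ofList (pvDigitsB number (pvCountDigits number))

-- ===== PRECONDITION & SPEC =====
def Spec_encode_timestamp (number : Int) (out : String) : Prop := out = encode_timestamp_alt number
instance (number : Int) (out : String) : Decidable (Spec_encode_timestamp number out) := by unfold Spec_encode_timestamp; infer_instance

-- ===== CLAIM (what is proved, stated in full; the proofs are below) =====
def Claim_equal_encode_timestamp : Prop := ∀ (number : Int), Dom_encode_timestamp number → Spec_encode_timestamp number (encode_timestamp number)

-- ===== LEMMAS AND PROOFS =====

-- floordiv composes: (n // 26) // 26^i = n // 26^(i+1), for n > 0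
theorem pv_fd_pow (n : Int) (h : 0 < n) (i : Nat) :
    PySem.Int.floordiv (PySem.Int.floordiv n 26) (26 ^ i) = PySem.Int.floordiv n (26 ^ (i + 1)) := by
  rw [PySem.Int.floordiv_eq_ediv_of_pos (by omega : (0:Int) < 26),
      PySem.Int.floordiv_eq_ediv_of_pos (by positivity : (0:Int) < 26 ^ i),
      PySem.Int.floordiv_eq_ediv_of_pos (by positivity : (0:Int) < 26 ^ (i + 1))]
  have h26 : (26:Int) ^ (i + 1) = 26 * 26 ^ i := by ring
  rw [h26, ← Int.ediv_ediv_of_nonneg (by omega)]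

-- peel the least-significant digit off B's most-significant-first build
theorem pv_digits_peel (k : Nat) : ∀ (n : Int), 0 < n →
    pvDigitsB n (k + 1) = pvDigitsB (PySem.Int.floordiv n 26) k ++ [pvCharAt (PySem.Int.mod n 26)] := by
  induction k with
  | zero =>
    intro n hn
    simp [pvDigitsB]
  | succ i ih =>
    intro n hn
    show pvCharAt (PySem.Int.mod (PySem.Int.floordiv n (26 ^ (i + 1))) 26) :: pvDigitsB n (i + 1) = _
    rw [ih n hn, ← pv_fd_pow n hn i]
    rfl

-- A's loop equals B's count-then-emit build, with the accumulator appended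
theorem pv_loopA_eq (m : Nat) : ∀ (n : Int), n.toNat ≤ m → 0 < n → ∀ acc,
    pvEncLoopA n acc = pvDigitsB n (pvCountDigits n) ++ acc := by
  induction m with
  | zero => intro n hm hn; omega
  | succ m ih =>
    intro n hm hn acc
    rw [pvEncLoopA, if_pos (by omega), pvCountDigits, if_pos (by omega),
        pv_digits_peel _ n hn]
    have hfd : 0 ≤ PySem.Int.floordiv n 26 := by
      rw [PySem.Int.floordiv_eq_ediv_of_pos (by omega : (0:Int) < 26)]; omega
    by_cases hf : 0 < PySem.Int.floordiv n 26
    · rw [ih _ (by have := pv_floordiv26_lt n hn; omega) hf]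
      simp
    · have h0 : PySem.Int.floordiv n 26 = 0 := by omega
      rw [h0, pvEncLoopA, pvCountDigits]
      simp [pvDigitsB]

-- ===== VERDICT (by name: the statement is the Claim_ definition above) =====
theorem encode_timestamp_spec : Claim_equal_encode_timestamp := by
  intro number _
  unfold Spec_encode_timestamp encode_timestamp encode_timestamp_alt
  by_cases h0 : number = 0
  · simp [h0]
  · rw [if_neg h0, if_neg h0]
    by_cases hp : 0 < number
    · rw [pv_loopA_eq number.toNat number le_rfl hp]
      simp
    · rw [pvEncLoopA, if_neg (by omega), pvCountDigits, if_neg (by omega)]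
      rfl
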